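-- pv_equiv track=rewrite | github.com/VforVitorio/F1-StratLab | src/agents/radio_agent.py | _collect_bio_spans
-- ===== SOURCE A (Python) =====
-- def _collect_bio_spans(words: list, word_tags: dict) -> list:
--     """Collapse contiguous B-/I- tag sequences into entity span dicts.
--
--     A new span opens on every B- tag. An I- tag extends the current span
--     only when its type matches the open span. Returns a list of
--     {text, label} dicts; empty list when no named entities are detected.
--     """
--     spans, current_type, span_words = [], None, []
--     for wi, word in enumerate(words):
--         tag = word_tags.get(wi, "O")
--         if tag.startswith("B-"):
--             if current_type:
--                 spans.append({
--                     "text":  " ".join(span_words),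
--                     "label": current_type.lower().replace("_", " "),
--                 })
--             current_type, span_words = tag[2:], [word]
--         elif tag.startswith("I-") and current_type == tag[2:]:
--             span_words.append(word)
--         else:
--             if current_type:
--                 spans.append({
--                     "text":  " ".join(span_words),
--                     "label": current_type.lower().replace("_", " "),
--                 })
--             current_type, span_words = None, []
--     if current_type:
--         spans.append({
--             "text":  " ".join(span_words),
--             "label": current_type.lower().replace("_", " "),
--         })
--     return spans
-- ===== SOURCE B (Python) =====
-- def _collect_bio_spans(words: list, word_tags: dict) -> list:
--     """Two-pass variant: first collect (start, end, type) index ranges with a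
--     minimal state machine, then format each range by slicing words."""
--     ranges = []
--     cur, start = None, 0
--     for wi, word in enumerate(words):
--         tag = word_tags.get(wi, "O")
--         if tag.startswith("B-"):
--             if cur:
--                 ranges.append((start, wi, cur))
--             cur, start = tag[2:], wi
--         elif not (tag.startswith("I-") and cur == tag[2:]):
--             if cur:
--                 ranges.append((start, wi, cur))
--             cur = None
--     if cur:
--         ranges.append((start, len(words), cur))
--     return [{"text": " ".join(words[s:e]),
--              "label": t.lower().replace("_", " ")} for s, e, t in ranges]
-- ===== Notes on version B (the rewrite author's own statement) =====
-- stated objective: alternative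
-- what changed: B's scan keeps only (start, end, type) index ranges instead of accumulating the span's word list, and a separate second pass slices words and formats each range into its dict.
import Mathlib
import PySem

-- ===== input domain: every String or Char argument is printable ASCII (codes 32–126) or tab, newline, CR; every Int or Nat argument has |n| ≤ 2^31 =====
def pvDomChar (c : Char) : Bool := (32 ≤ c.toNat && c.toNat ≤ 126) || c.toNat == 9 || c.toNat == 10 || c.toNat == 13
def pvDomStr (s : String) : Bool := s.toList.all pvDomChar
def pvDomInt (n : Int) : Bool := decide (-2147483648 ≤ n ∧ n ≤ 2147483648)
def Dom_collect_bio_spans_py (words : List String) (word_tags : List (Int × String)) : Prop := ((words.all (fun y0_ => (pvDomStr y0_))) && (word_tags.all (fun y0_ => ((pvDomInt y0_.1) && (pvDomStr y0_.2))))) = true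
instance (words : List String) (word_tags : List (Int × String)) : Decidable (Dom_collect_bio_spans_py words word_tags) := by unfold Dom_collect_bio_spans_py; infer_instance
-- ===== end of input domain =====

-- B collects (start, end, type) index ranges in one scan and formats them in a
-- second pass by slicing words — an alternative decomposition of A's single
-- loop that accumulates the span words themselves (objective: alternative).

-- ===== PORT A =====
-- {"text": ..., "label": ...} dict built at each flush of A
def pvSpanDictA (sw : List String) (t : String) : List (String × String) :=
  [("text", PySem.Str.join " " sw), ("label", PySem.Str.replace (PySem.Str.lower t) "_" " ")]

-- A's "if current_type: spans.append({...})" (Python truthiness: None and "" are falsy)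
def pvFlushA (spans : List (List (String × String))) (ct : Option String)
    (sw : List String) : List (List (String × String)) :=
  match ct with
  | some t => if t == "" then spans else spans ++ [pvSpanDictA sw t]
  | none => spans

-- one iteration of A's loop body; state = (spans, current_type, span_words)
def pvStepA (word_tags : List (Int × String))
    (st : List (List (String × String)) × Option String × List String)
    (p : Int × String) : List (List (String × String)) × Option String × List String :=
  let tag := PySem.Dict.getD (PySem.Dict.mk word_tags) p.1 "O"
  if PySem.Str.startswith tag "B-" then
    (pvFlushA st.1 st.2.1 st.2.2, some (PySem.Str.slice tag (some 2) none), [p.2])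
  else if PySem.Str.startswith tag "I-" && (st.2.1 == some (PySem.Str.slice tag (some 2) none)) then
    (st.1, st.2.1, st.2.2 ++ [p.2])
  else
    (pvFlushA st.1 st.2.1 st.2.2, none, [])

def collect_bio_spans_py (words : List String) (word_tags : List (Int × String)) :
    List (List (String × String)) :=
  let st := (PySem.List.enumerate words 0).foldl (pvStepA word_tags) ([], none, [])
  pvFlushA st.1 st.2.1 st.2.2

-- ===== PORT B =====
-- B's "if cur: ranges.append((start, e, cur))" (Python truthiness: None and "" are falsy)
def pvFlushB (ranges : List (Int × Int × String)) (cur : Option String)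
    (start e : Int) : List (Int × Int × String) :=
  match cur with
  | some t => if t == "" then ranges else ranges ++ [(start, e, t)]
  | none => ranges

-- one iteration of B's loop body; state = (ranges, cur, start)
def pvStepB (word_tags : List (Int × String))
    (st : List (Int × Int × String) × Option String × Int)
    (p : Int × String) : List (Int × Int × String) × Option String × Int :=
  let tag := PySem.Dict.getD (PySem.Dict.mk word_tags) p.1 "O"
  if PySem.Str.startswith tag "B-" then
    (pvFlushB st.1 st.2.1 st.2.2 p.1, some (PySem.Str.slice tag (some 2) none), p.1)
  else if PySem.Str.startswith tag "I-" && (st.2.1 == some (PySem.Str.slice tag (some 2) none)) then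
    st
  else
    (pvFlushB st.1 st.2.1 st.2.2 p.1, none, st.2.2)

-- the comprehension body of B's second pass
def pvFmtR (words : List String) (r : Int × Int × String) : List (String × String) :=
  [("text", PySem.Str.join " " (PySem.List.slice words (some r.1) (some r.2.1))),
   ("label", PySem.Str.replace (PySem.Str.lower r.2.2) "_" " ")]

def collect_bio_spans_py_alt (words : List String) (word_tags : List (Int × String)) :
    List (List (String × String)) :=
  let st := (PySem.List.enumerate words 0).foldl (pvStepB word_tags) ([], none, 0)
  (pvFlushB st.1 st.2.1 st.2.2 (words.length : Int)).map (pvFmtR words)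

-- ===== PRECONDITION & SPEC =====
def Spec_collect_bio_spans_py (words : List String) (word_tags : List (Int × String)) (out : List (List (String × String))) : Prop := out = collect_bio_spans_py_alt words word_tags
instance (words : List String) (word_tags : List (Int × String)) (out : List (List (String × String))) : Decidable (Spec_collect_bio_spans_py words word_tags out) := by unfold Spec_collect_bio_spans_py; infer_instance

-- ===== CLAIM (what is proved, stated in full; the proofs are below) =====
def Claim_equal_collect_bio_spans_py : Prop := ∀ (words : List String) (word_tags : List (Int × String)), Dom_collect_bio_spans_py words word_tags → Spec_collect_bio_spans_py words word_tags (collect_bio_spans_py words word_tags)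

-- ===== LEMMAS AND PROOFS =====

-- invariant relating A's state (after n words) to B's state
def pvRel (words : List String) (n : Nat)
    (a : List (List (String × String)) × Option String × List String)
    (b : List (Int × Int × String) × Option String × Int) : Prop :=
  a.1 = b.1.map (pvFmtR words) ∧ a.2.1 = b.2.1 ∧
  ∃ s : Nat, b.2.2 = (s : Int) ∧
    (∀ t, a.2.1 = some t → s ≤ n ∧ a.2.2 = (words.drop s).take (n - s))

theorem pvFlush_eq (words : List String) (n s : Nat) (ranges : List (Int × Int × String))
    (ct : Option String) (sw : List String)
    (hsw : ∀ t, ct = some t → s ≤ n ∧ sw = (words.drop s).take (n - s)) :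
    pvFlushA (ranges.map (pvFmtR words)) ct sw
      = (pvFlushB ranges ct (s : Int) (n : Int)).map (pvFmtR words) := by
  cases ct with
  | none => simp [pvFlushA, pvFlushB]
  | some t =>
    obtain ⟨hs, hsw'⟩ := hsw t rfl
    by_cases ht : t = ""
    · simp [pvFlushA, pvFlushB, ht]
    · simp [pvFlushA, pvFlushB, ht, pvFmtR, pvSpanDictA, hsw',
        PySem.List.slice_natCast]

theorem pvStep_rel (words : List String) (wt : List (Int × String)) (n : Nat)
    (hn : n < words.length) (a : _) (b : _) (h : pvRel words n a b) :
    pvRel words (n + 1) (pvStepA wt a ((n : Int), words[n]))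
      (pvStepB wt b ((n : Int), words[n])) := by
  obtain ⟨h1, h2, s, hb, hsw⟩ := h
  have hdrop : words.drop n = words[n] :: words.drop (n + 1) :=
    List.drop_eq_getElem_cons hn
  unfold pvStepA pvStepB
  simp only [h2]
  split
  · -- B- branch
    refine ⟨?_, rfl, n, rfl, ?_⟩
    · simp only [h1, hb]
      exact pvFlush_eq words n s b.1 b.2.1 a.2.2 (fun t ht => hsw t (h2.trans ht))
    · intro t _
      refine ⟨by omega, ?_⟩
      have h1n : n + 1 - n = 1 := by omega
      rw [h1n, hdrop]
      rfl
  · split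
    · -- matching I- branch
      refine ⟨h1, rfl, s, hb, ?_⟩
      intro t ht
      obtain ⟨hs, hsw'⟩ := hsw t (h2.trans ht)
      refine ⟨by omega, ?_⟩
      have hlen : n - s < (words.drop s).length := by
        simp [List.length_drop]; omega
      have : n + 1 - s = (n - s) + 1 := by omega
      rw [hsw', this, List.take_add_one]
      have : (words.drop s)[n - s]? = some words[n] := by
        rw [List.getElem?_drop]
        have : s + (n - s) = n := by omega
        rw [this, List.getElem?_eq_getElem hn]
      simp [this]
    · -- else branch
      refine ⟨?_, rfl, s, hb, by simp⟩
      simp only [h1, hb]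
      exact pvFlush_eq words n s b.1 b.2.1 a.2.2 (fun t ht => hsw t (h2.trans ht))

theorem pvLoop_rel (words : List String) (wt : List (Int × String)) :
    ∀ (rest : List String) (n : Nat) (a : _) (b : _),
      words.drop n = rest → n ≤ words.length → pvRel words n a b →
      pvRel words words.length
        ((PySem.List.enumerate rest (n : Int)).foldl (pvStepA wt) a)
        ((PySem.List.enumerate rest (n : Int)).foldl (pvStepB wt) b) := by
  intro rest
  induction rest with
  | nil =>
    intro n a b hdrop hlen h
    simp only [PySem.List.enumerate_nil, List.foldl_nil]
    have hl := congrArg List.length hdrop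
    simp only [List.length_drop, List.length_nil] at hl
    have : n = words.length := by omega
    exact this ▸ h
  | cons x rest' ih =>
    intro n a b hdrop hlen h
    have hl := congrArg List.length hdrop
    simp only [List.length_drop, List.length_cons] at hl
    have hn : n < words.length := by omega
    have hx : words[n] = x := by
      have := List.drop_eq_getElem_cons hn
      rw [hdrop] at this
      exact (List.cons.injEq _ _ _ _ ▸ this).1.symm
    have hdrop' : words.drop (n + 1) = rest' := by
      have := List.drop_eq_getElem_cons hn
      rw [hdrop, hx] at this
      exact (List.cons.injEq _ _ _ _ ▸ this).2.symm
    simp only [PySem.List.enumerate_cons, List.foldl_cons]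
    have hstep := pvStep_rel words wt n hn a b h
    rw [hx] at hstep
    have hcast : (n : Int) + 1 = ((n + 1 : Nat) : Int) := by push_cast; ring
    rw [hcast]
    exact ih (n + 1) _ _ hdrop' (by omega) hstep

-- ===== VERDICT (by name: the statement is the Claim_ definition above) =====
theorem collect_bio_spans_py_spec : Claim_equal_collect_bio_spans_py := by
  intro words wt _
  unfold Spec_collect_bio_spans_py collect_bio_spans_py collect_bio_spans_py_alt
  show pvFlushA ((PySem.List.enumerate words 0).foldl (pvStepA wt) ([], none, [])).1
      ((PySem.List.enumerate words 0).foldl (pvStepA wt) ([], none, [])).2.1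
      ((PySem.List.enumerate words 0).foldl (pvStepA wt) ([], none, [])).2.2
    = (pvFlushB ((PySem.List.enumerate words 0).foldl (pvStepB wt) ([], none, 0)).1
        ((PySem.List.enumerate words 0).foldl (pvStepB wt) ([], none, 0)).2.1
        ((PySem.List.enumerate words 0).foldl (pvStepB wt) ([], none, 0)).2.2
        (words.length : Int)).map (pvFmtR words)
  have h0 : pvRel words 0 ([], none, []) ([], none, 0) :=
    ⟨rfl, rfl, 0, rfl, fun t ht => by simp at ht⟩
  have h := pvLoop_rel words wt words 0 ([], none, []) ([], none, 0)
    (by simp) (by simp) h0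
  simp only [Nat.cast_zero] at h
  obtain ⟨h1, h2, s, hb, hsw⟩ := h
  rw [h1, h2, hb]
  exact pvFlush_eq words words.length s _ _ _
    (fun t ht => hsw t (h2.trans ht))
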